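-- pv_equiv track=rewrite | github.com/alveskan47/romaniarunning | python-files/update-statistics.py | update_competitions_by_month
-- ===== SOURCE A (Python) =====
-- from collections import defaultdict
--
-- def update_competitions_by_month(competitions_data):
--     """
--     Calculate the number of competitions per month for each year.
--
--     This function counts how many competitions are held in each month of each year
--     by examining the editions array for each competition. Each edition has a year
--     and month field that indicates when that particular edition takes place.
--
--     Parameters:
--     -----------
--     competitions_data : dict
--         The competitions data loaded from input-all-competitions.json
--         Expected structure: {"competitions": [{"editions": [{"year": 2024, "month": 5, ...}]}]}
--
--     Returns:
--     --------
--     dict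
--         Dictionary with years as keys and arrays of 12 integers as values
--         Each array contains the count of competitions for each month (January to December)
--         Example: {"2024": [2, 10, 10, 30, 40, 54, 19, 25, 51, 47, 25, 15]}
--     """
--     # Dictionary to store competitions by month for each year
--     # Each year will have an array of 12 integers (one for each month)
--     year_month_counts = defaultdict(lambda: [0] * 12)
--
--     # Iterate through all competitions
--     competitions = competitions_data.get('competitions', [])
--     for competition in competitions:
--         # Get editions for this competition
--         editions = competition.get('editions', [])
--
--         # Count each edition by year and month
--         for edition in editions:
--             year = str(edition.get('year'))
--             month = edition.get('month')
--
--             # Validate year and month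
--             if year and month and 1 <= month <= 12:
--                 # Increment the count for this month (month - 1 for 0-based index)
--                 year_month_counts[year][month - 1] += 1
--
--     # Convert defaultdict to regular dict and sort by year
--     return dict(sorted(year_month_counts.items()))
-- ===== SOURCE B (Python) =====
-- from collections import Counter
--
-- def update_competitions_by_month(competitions_data):
--     # Flatten all editions into one (year-string, month) event stream, count the
--     # valid events with a single flat Counter keyed by the tuple, then reshape
--     # into per-year 12-slot arrays over the sorted distinct years.
--     events = [(str(e.get('year')), e.get('month'))
--               for c in competitions_data.get('competitions', [])
--               for e in c.get('editions', [])]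
--     valid = [(y, m) for y, m in events if m and 1 <= m <= 12]
--     counts = Counter(valid)
--     return {y: [counts[(y, m)] for m in range(1, 13)]
--             for y in sorted({y for y, _ in valid})}
-- ===== Notes on version B (the rewrite author's own statement) =====
-- stated objective: alternative
-- what changed: A writes directly into per-year 12-slot arrays held in a defaultdict inside the nested loops and sorts the items; B first flattens all editions into one (year-string, month) event list, counts valid events with a single flat tuple-keyed Counter, and only then reshapes the counts into per-year 12-int arrays over the sorted distinct years.
import Mathlib
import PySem

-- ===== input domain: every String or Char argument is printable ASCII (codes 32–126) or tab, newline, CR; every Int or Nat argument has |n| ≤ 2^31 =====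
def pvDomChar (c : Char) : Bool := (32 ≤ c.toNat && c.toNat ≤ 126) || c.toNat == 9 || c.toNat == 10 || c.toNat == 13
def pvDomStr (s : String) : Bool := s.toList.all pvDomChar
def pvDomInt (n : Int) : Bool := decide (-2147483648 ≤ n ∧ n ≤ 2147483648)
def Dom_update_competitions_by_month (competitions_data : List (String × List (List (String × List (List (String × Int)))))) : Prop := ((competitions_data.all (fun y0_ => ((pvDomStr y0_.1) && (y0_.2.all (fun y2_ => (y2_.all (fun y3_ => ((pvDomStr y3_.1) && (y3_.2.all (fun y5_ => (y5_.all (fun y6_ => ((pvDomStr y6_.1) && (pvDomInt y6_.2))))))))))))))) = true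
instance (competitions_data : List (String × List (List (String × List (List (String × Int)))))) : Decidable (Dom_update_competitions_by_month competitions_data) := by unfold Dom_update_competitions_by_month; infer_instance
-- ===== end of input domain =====

-- B replaces A's nested loops that mutate per-year 12-slot arrays in a defaultdict by a flat
-- (year-string, month) event list counted with one tuple-keyed counter and reshaped afterwards
-- (objective: alternative decomposition, same return value; no speed claim).

-- ===== PORT A =====
-- `year = str(edition.get('year'))`: str() of an int or of None ("None"), always a non-empty
-- string, so Python's `if year` truthiness test is always true and is not ported.
def pvYearStrA (edition : List (String × Int)) : String :=
  match edition.lookup "year" with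
  | some n => PySem.Int.toStr n
  | none => "None"

-- `year_month_counts[year][month - 1] += 1` on the defaultdict: read the current (or default)
-- 12-slot list, bump slot month-1, store it back under `year` (overwrite keeps position, a new
-- key appends — exactly defaultdict behaviour).  The index month-1 is always in range 0..11
-- here (guarded by 1 <= month <= 12), so List.set/List.getD are exact.
def pvBumpA (ymc : PySem.Dict String (List Int)) (year : String) (month : Int) : PySem.Dict String (List Int) :=
  let arr := ymc.getD year (List.replicate 12 0)
  ymc.insert year (arr.set (month - 1).toNat (arr.getD (month - 1).toNat 0 + 1))

def update_competitions_by_month (competitions_data : List (String × List (List (String × List (List (String × Int)))))) : List (String × List Int) :=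
  let competitions := (competitions_data.lookup "competitions").getD []
  let ymc : PySem.Dict String (List Int) :=
    competitions.foldl (fun ymc competition =>
      ((competition.lookup "editions").getD []).foldl (fun ymc edition =>
        match edition.lookup "month" with
        | some month =>
            if month ≠ 0 ∧ 1 ≤ month ∧ month ≤ 12 then pvBumpA ymc (pvYearStrA edition) month
            else ymc
        | none => ymc) ymc) PySem.Dict.empty
  -- dict(sorted(year_month_counts.items())): Python compares the (str, list) item tuples
  PySem.List.sorted2 ymc.items (fun p => p.1) (fun p => p.2)

-- ===== PORT B =====
-- one (str(e.get('year')), e.get('month')) event per edition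
def pvEventB (edition : List (String × Int)) : String × Option Int :=
  ((match edition.lookup "year" with
    | some n => PySem.Int.toStr n
    | none => "None"), edition.lookup "month")

def update_competitions_by_month_alt (competitions_data : List (String × List (List (String × List (List (String × Int)))))) : List (String × List Int) :=
  let events := ((competitions_data.lookup "competitions").getD []).flatMap
    (fun c => ((c.lookup "editions").getD []).map pvEventB)
  let valid := events.filterMap (fun p =>
    match p.2 with
    | some m => if m ≠ 0 ∧ 1 ≤ m ∧ m ≤ 12 then some (p.1, m) else none
    | none => none)
  let counts := PySem.Dict.counter valid
  (PySem.List.sorted (PySem.Set.ofList (valid.map (fun p => p.1))) (fun y => y)).map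
    (fun y => (y, (PySem.List.pyRange 1 13 1).map (fun m => counts.getD (y, m) 0)))

-- ===== PRECONDITION & SPEC =====
def Spec_update_competitions_by_month (competitions_data : List (String × List (List (String × List (List (String × Int)))))) (out : List (String × List Int)) : Prop := out = update_competitions_by_month_alt competitions_data
instance (competitions_data : List (String × List (List (String × List (List (String × Int)))))) (out : List (String × List Int)) : Decidable (Spec_update_competitions_by_month competitions_data out) := by unfold Spec_update_competitions_by_month; infer_instance

-- ===== CLAIM (what is proved, stated in full; the proofs are below) =====
def Claim_equal_update_competitions_by_month : Prop := ∀ (competitions_data : List (String × List (List (String × List (List (String × Int)))))), Dom_update_competitions_by_month competitions_data → Spec_update_competitions_by_month competitions_data (update_competitions_by_month competitions_data)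

-- ===== LEMMAS AND PROOFS =====

-- the valid (year-string, month) event extracted from one edition, if any
def pvEvOf (edition : List (String × Int)) : Option (String × Int) :=
  match edition.lookup "month" with
  | some m => if m ≠ 0 ∧ 1 ≤ m ∧ m ≤ 12 then some (pvYearStrA edition, m) else none
  | none => none

-- the flat stream of valid events of the whole input
def pvEvents (competitions_data : List (String × List (List (String × List (List (String × Int)))))) : List (String × Int) :=
  ((competitions_data.lookup "competitions").getD []).flatMap
    (fun c => ((c.lookup "editions").getD []).filterMap pvEvOf)

-- A's dict update, as a step function over events
def pvStep (d : PySem.Dict String (List Int)) (p : String × Int) : PySem.Dict String (List Int) :=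
  pvBumpA d p.1 p.2

theorem pv_foldl_filterMap {α β γ : Type} (g : α → Option β) (f : γ → β → γ) (l : List α) (init : γ) :
    l.foldl (fun a x => match g x with | some b => f a b | none => a) init
      = (l.filterMap g).foldl f init := by
  induction l generalizing init with
  | nil => rfl
  | cons x t ih => cases hx : g x <;> simp [hx, ih]

theorem pv_inner (l : List (List (String × Int))) (d : PySem.Dict String (List Int)) :
    l.foldl (fun ymc edition =>
      match edition.lookup "month" with
      | some month =>
          if month ≠ 0 ∧ 1 ≤ month ∧ month ≤ 12 then pvBumpA ymc (pvYearStrA edition) month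
          else ymc
      | none => ymc) d = (l.filterMap pvEvOf).foldl pvStep d := by
  rw [← pv_foldl_filterMap pvEvOf pvStep]
  apply PySem.List.foldl_congr_mem
  intro acc e _
  simp only [pvEvOf]
  cases he : e.lookup "month" with
  | none => rfl
  | some m =>
    by_cases hg : m ≠ 0 ∧ 1 ≤ m ∧ m ≤ 12
    · simp only [if_pos hg]; rfl
    · simp only [if_neg hg]

theorem pvA_eq (cd : List (String × List (List (String × List (List (String × Int)))))) :
    update_competitions_by_month cd
      = PySem.List.sorted2 ((pvEvents cd).foldl pvStep PySem.Dict.empty).items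
          (fun p => p.1) (fun p => p.2) := by
  have hfun : ∀ (d : PySem.Dict String (List Int)) (c : List (String × List (List (String × Int)))),
      ((c.lookup "editions").getD []).foldl (fun ymc edition =>
        match edition.lookup "month" with
        | some month =>
            if month ≠ 0 ∧ 1 ≤ month ∧ month ≤ 12 then pvBumpA ymc (pvYearStrA edition) month
            else ymc
        | none => ymc) d
      = (((c.lookup "editions").getD []).filterMap pvEvOf).foldl pvStep d :=
    fun d c => pv_inner _ d
  simp only [update_competitions_by_month, pvEvents, List.foldl_flatMap, hfun]

theorem pvB_eq (cd : List (String × List (List (String × List (List (String × Int)))))) :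
    update_competitions_by_month_alt cd
      = (PySem.List.sorted (PySem.Set.ofList ((pvEvents cd).map (fun p => p.1))) (fun y => y)).map
          (fun y => (y, (PySem.List.pyRange 1 13 1).map
            (fun m => (PySem.Dict.counter (pvEvents cd)).getD (y, m) 0))) := by
  have hv : (((cd.lookup "competitions").getD []).flatMap
        (fun c => ((c.lookup "editions").getD []).map pvEventB)).filterMap (fun p =>
          match p.2 with
          | some m => if m ≠ 0 ∧ 1 ≤ m ∧ m ≤ 12 then some (p.1, m) else none
          | none => none) = pvEvents cd := by
    simp only [pvEvents, List.filterMap_flatMap, List.filterMap_map]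
    rfl
  simp only [update_competitions_by_month_alt, hv]

theorem pv_events_months (cd : List (String × List (List (String × List (List (String × Int)))))) :
    ∀ p ∈ pvEvents cd, 1 ≤ p.2 ∧ p.2 ≤ 12 := by
  intro p hp
  simp only [pvEvents, List.mem_flatMap, List.mem_filterMap] at hp
  obtain ⟨c, _, e, _, he⟩ := hp
  cases hm : e.lookup "month" with
  | none => simp [pvEvOf, hm] at he
  | some m =>
    simp only [pvEvOf, hm] at he
    split_ifs at he with hg
    · injection he with h
      subst h
      exact ⟨hg.2.1, hg.2.2⟩

-- fold characterization: lengths stay 12 and each slot counts its events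
theorem pv_fold_getD (ev : List (String × Int)) (hm : ∀ p ∈ ev, 1 ≤ p.2 ∧ p.2 ≤ 12)
    (d : PySem.Dict String (List Int))
    (hd : ∀ y, (d.getD y (List.replicate 12 0)).length = 12) :
    (∀ y, ((ev.foldl pvStep d).getD y (List.replicate 12 0)).length = 12) ∧
    ∀ (y : String) (i : Nat), i < 12 →
      ((ev.foldl pvStep d).getD y (List.replicate 12 0)).getD i 0
        = (d.getD y (List.replicate 12 0)).getD i 0 + (ev.count (y, (i : Int) + 1) : Int) := by
  induction ev generalizing d with
  | nil => exact ⟨hd, fun y i hi => by simp⟩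
  | cons p t ih =>
    obtain ⟨y0, m0⟩ := p
    obtain ⟨h01, h02⟩ : 1 ≤ m0 ∧ m0 ≤ 12 := hm (y0, m0) (by simp)
    have hlen : (d.getD y0 (List.replicate 12 0)).length = 12 := hd y0
    have hj : (m0 - 1).toNat < 12 := by omega
    have hd' : ∀ y, ((pvStep d (y0, m0)).getD y (List.replicate 12 0)).length = 12 := by
      intro y
      simp only [pvStep, pvBumpA, PySem.Dict.getD_insert]
      split
      · rw [List.length_set]; exact hd y0
      · exact hd y
    obtain ⟨hL, hV⟩ := ih (fun q hq => hm q (by simp [hq])) _ hd'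
    refine ⟨hL, ?_⟩
    intro y i hi
    rw [List.foldl_cons, hV y i hi, List.count_cons]
    simp only [pvStep, pvBumpA, PySem.Dict.getD_insert]
    have hget : ∀ (v : Int), ((d.getD y0 (List.replicate 12 0)).set (m0 - 1).toNat v).getD i 0
        = if (m0 - 1).toNat = i then v else (d.getD y0 (List.replicate 12 0)).getD i 0 := by
      intro v
      rw [List.getD_eq_getElem?_getD, List.getElem?_set, List.getD_eq_getElem?_getD]
      by_cases hij : (m0 - 1).toNat = i
      · rw [if_pos hij, if_pos hij, if_pos (by rw [hlen]; exact hj)]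
        rfl
      · rw [if_neg hij, if_neg hij]
    by_cases hy : y = y0
    · subst hy
      rw [if_pos rfl, hget]
      by_cases hij : (m0 - 1).toNat = i
      · rw [if_pos hij]
        have hbeq : ((y, m0) == (y, (i : Int) + 1)) = true := by
          rw [beq_iff_eq]
          exact Prod.ext rfl (by simp only; omega)
        rw [if_pos hbeq, hij]
        push_cast
        ring
      · rw [if_neg hij]
        have hbeq : ((y, m0) == (y, (i : Int) + 1)) = false := by
          rw [beq_eq_false_iff_ne]
          intro hc
          apply hij
          have h2 := congrArg Prod.snd hc
          simp only at h2
          omega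
        rw [hbeq]
        simp
    · rw [if_neg hy]
      have hbeq : ((y0, m0) == (y, (i : Int) + 1)) = false := by
        rw [beq_eq_false_iff_ne]
        intro hc
        exact hy (congrArg Prod.fst hc).symm
      rw [hbeq]
      simp

theorem pv_fold_keys (ev : List (String × Int)) :
    (ev.foldl pvStep PySem.Dict.empty).keys = PySem.Set.ofList (ev.map (fun p => p.1)) := by
  have hs : pvStep = fun (d : PySem.Dict String (List Int)) (p : String × Int) =>
      d.insert p.1 ((d.getD p.1 (List.replicate 12 0)).set (p.2 - 1).toNat
        ((d.getD p.1 (List.replicate 12 0)).getD (p.2 - 1).toNat 0 + 1)) := rfl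
  rw [hs, PySem.Dict.keys_foldl_insert_key]
  rw [PySem.Set.ofList_eq_foldl]
  rfl

theorem pv_fold_nodup (ev : List (String × Int)) :
    (ev.foldl pvStep PySem.Dict.empty).keys.Nodup := by
  have hs : pvStep = fun (d : PySem.Dict String (List Int)) (p : String × Int) =>
      d.insert p.1 ((d.getD p.1 (List.replicate 12 0)).set (p.2 - 1).toNat
        ((d.getD p.1 (List.replicate 12 0)).getD (p.2 - 1).toNat 0 + 1)) := rfl
  rw [hs]
  exact PySem.Dict.nodup_keys_foldl_insert_key _ _ _ _ PySem.Dict.nodup_keys_empty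

theorem pv_insertBy_congr {α : Type} (f g : α → α → Bool) (x : α) (acc : List α)
    (h : ∀ y ∈ acc, f x y = g x y) :
    PySem.List.insertBy f x acc = PySem.List.insertBy g x acc := by
  induction acc with
  | nil => rfl
  | cons a t ih =>
    rw [show PySem.List.insertBy f x (a :: t)
          = if f x a then x :: a :: t else a :: PySem.List.insertBy f x t from rfl,
        show PySem.List.insertBy g x (a :: t)
          = if g x a then x :: a :: t else a :: PySem.List.insertBy g x t from rfl,
        h a (List.mem_cons_self)]
    split
    · rfl
    · rw [ih (fun y hy => h y (List.mem_cons_of_mem _ hy))]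

theorem pv_foldl_insertBy_congr {α : Type} (f g : α → α → Bool) (S : List α)
    (h : ∀ a ∈ S, ∀ b ∈ S, f a b = g a b) :
    ∀ (xs acc : List α), (∀ x ∈ xs, x ∈ S) → (∀ y ∈ acc, y ∈ S) →
      xs.foldl (fun acc x => PySem.List.insertBy f x acc) acc
        = xs.foldl (fun acc x => PySem.List.insertBy g x acc) acc := by
  intro xs
  induction xs with
  | nil => intro acc _ _; rfl
  | cons x t ih =>
    intro acc hxs hacc
    have hx : x ∈ S := hxs x List.mem_cons_self
    rw [List.foldl_cons, List.foldl_cons,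
        pv_insertBy_congr f g x acc (fun y hy => h x hx y (hacc y hy))]
    apply ih _ (fun z hz => hxs z (List.mem_cons_of_mem _ hz))
    intro y hy
    rcases (PySem.List.mem_insertBy g x y acc).1 hy with rfl | hy'
    · exact hx
    · exact hacc y hy'

theorem pv_sorted2_eq_sorted {α κ₁ κ₂ : Type} [LT κ₁] [DecidableLT κ₁] [LT κ₂] [DecidableLT κ₂]
    (xs : List α) (k1 : α → κ₁) (k2 : α → κ₂)
    (hirr2 : ∀ a ∈ xs, ¬ k2 a < k2 a)
    (hcmp : ∀ a ∈ xs, ∀ b ∈ xs, ¬ k1 a < k1 b → ¬ k1 b < k1 a → a = b) :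
    PySem.List.sorted2 xs k1 k2 = PySem.List.sorted xs k1 := by
  show xs.foldl (fun acc x => PySem.List.insertBy
        (fun a b => decide (k1 a < k1 b) || !decide (k1 b < k1 a) && decide (k2 a < k2 b)) x acc) []
      = xs.foldl (fun acc x => PySem.List.insertBy (fun a b => decide (k1 a < k1 b)) x acc) []
  have hpw : ∀ a ∈ xs, ∀ b ∈ xs,
      (decide (k1 a < k1 b) || !decide (k1 b < k1 a) && decide (k2 a < k2 b))
        = decide (k1 a < k1 b) := by
    intro a ha b hb
    by_cases h1 : k1 a < k1 b
    · simp [h1]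
    · by_cases h2 : k1 b < k1 a
      · simp [h1, h2]
      · have hab := hcmp a ha b hb h1 h2
        subst hab
        simp [h1, hirr2 a ha]
  exact pv_foldl_insertBy_congr _ _ xs hpw xs [] (fun x hx => hx) (fun y hy => absurd hy List.not_mem_nil)

theorem pv_pyRange : PySem.List.pyRange 1 13 1 = (List.range 12).map (fun (i : Nat) => (i : Int) + 1) := by
  decide

-- A's per-year row equals B's reshaped counter row
theorem pv_row (ev : List (String × Int)) (hm : ∀ p ∈ ev, 1 ≤ p.2 ∧ p.2 ≤ 12) (y : String) :
    ((ev.foldl pvStep PySem.Dict.empty).getD y (List.replicate 12 0))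
      = (PySem.List.pyRange 1 13 1).map (fun m => (PySem.Dict.counter ev).getD (y, m) 0) := by
  obtain ⟨hL, hV⟩ := pv_fold_getD ev hm PySem.Dict.empty (by intro y; simp)
  rw [pv_pyRange, List.map_map]
  apply List.ext_getElem
  · rw [hL y]; simp
  · intro i h1 h2
    have hi : i < 12 := by rw [hL y] at h1; exact h1
    have hgd := hV y i hi
    rw [PySem.Dict.getD_empty] at hgd
    have hz : (List.replicate 12 (0 : Int)).getD i 0 = 0 := by
      rw [List.getD_eq_getElem?_getD, List.getElem?_replicate, if_pos hi]
      rfl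
    rw [hz, zero_add] at hgd
    rw [← List.getD_eq_getElem _ 0 h1, hgd]
    simp only [List.getElem_map, List.getElem_range, Function.comp_apply, PySem.Dict.getD_counter]

-- ===== VERDICT (by name: the statement is the Claim_ definition above) =====
theorem update_competitions_by_month_spec : Claim_equal_update_competitions_by_month := by
  intro cd _
  unfold Spec_update_competitions_by_month
  rw [pvA_eq, pvB_eq]
  have hm := pv_events_months cd
  have hkeys := pv_fold_keys (pvEvents cd)
  have hnd := pv_fold_nodup (pvEvents cd)
  have hitems := PySem.Dict.items_eq_map_keys ((pvEvents cd).foldl pvStep PySem.Dict.empty) hnd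
    (List.replicate 12 0)
  have hmapfst : (((pvEvents cd).foldl pvStep PySem.Dict.empty).items.map (fun p => p.1)).Nodup := by
    have : ((pvEvents cd).foldl pvStep PySem.Dict.empty).items.map (fun p => p.1)
        = ((pvEvents cd).foldl pvStep PySem.Dict.empty).keys := rfl
    rw [this]; exact hnd
  rw [pv_sorted2_eq_sorted _ _ _
    (fun a _ => List.lt_irrefl _)
    (fun a ha b hb h1 h2 => List.inj_on_of_nodup_map hmapfst ha hb (le_antisymm (not_lt.1 h2) (not_lt.1 h1)))]
  rw [hitems, hkeys]
  have hrow : ∀ k : String, (k, ((pvEvents cd).foldl pvStep PySem.Dict.empty).getD k (List.replicate 12 0))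
      = (k, (PySem.List.pyRange 1 13 1).map (fun m => (PySem.Dict.counter (pvEvents cd)).getD (k, m) 0)) :=
    fun k => by rw [pv_row (pvEvents cd) hm k]
  rw [List.map_congr_left (fun k _ => hrow k)]
  apply PySem.List.sorted_eq_of_perm_of_pairwise_lt
  · exact List.Perm.map _ (PySem.List.sorted_perm _ _ _)
  · rw [List.pairwise_map]
    exact PySem.List.sorted_ofList_pairwise_lt _
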